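-- pv_equiv track=rewrite | github.com/FreeworkEarth/neodepends | tools/enhance_python_deps.py | _compress_field_hits
-- ===== SOURCE A (Python) =====
-- from typing import Dict, List, Optional, Set, Tuple
--
-- def _compress_field_hits(field_names: List[str]) -> str:
--     counts: Dict[str, int] = {}
--     for name in field_names:
--         counts[name] = counts.get(name, 0) + 1
--     parts: List[str] = []
--     for name in sorted(counts.keys()):
--         n = counts[name]
--         parts.append(f"{name} x{n}" if n > 1 else name)
--     return ", ".join(parts)
-- ===== SOURCE B (Python) =====
-- from typing import List
--
-- def _compress_field_hits(field_names: List[str]) -> str: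
--     # sort once, then emit one part per run of equal names (no dict/Counter)
--     ordered = sorted(field_names)
--     parts: List[str] = []
--     i = 0
--     total = len(ordered)
--     while i < total:
--         j = i
--         while j < total and ordered[j] == ordered[i]:
--             j += 1
--         name = ordered[i]
--         n = j - i
--         parts.append(f"{name} x{n}" if n > 1 else name)
--         i = j
--     return ", ".join(parts)
-- ===== Notes on version B (the rewrite author's own statement) =====
-- stated objective: alternative
-- what changed: B sorts the list once and emits one part per run of equal adjacent names in a single scan, instead of building a frequency dict and then sorting its keys.
import Mathlib
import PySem

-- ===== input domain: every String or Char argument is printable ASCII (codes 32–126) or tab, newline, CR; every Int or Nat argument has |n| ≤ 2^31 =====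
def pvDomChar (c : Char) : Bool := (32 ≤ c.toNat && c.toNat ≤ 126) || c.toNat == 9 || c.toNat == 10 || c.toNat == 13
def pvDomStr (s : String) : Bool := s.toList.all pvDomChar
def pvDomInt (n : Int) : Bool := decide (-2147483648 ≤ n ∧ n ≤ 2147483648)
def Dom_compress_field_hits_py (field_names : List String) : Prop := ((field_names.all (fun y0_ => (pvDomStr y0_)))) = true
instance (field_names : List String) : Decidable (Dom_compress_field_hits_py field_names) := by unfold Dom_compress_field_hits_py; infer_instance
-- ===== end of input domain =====

-- B sorts once and emits one part per run of equal adjacent names; A builds a frequency dict and sorts its keys (alternative decomposition, same cost).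

-- ===== PORT A =====
def compress_field_hits_py (field_names : List String) : String :=
  let counts := field_names.foldl (fun d name => d.insert name (d.getD name 0 + 1)) (PySem.Dict.empty : PySem.Dict String Int)
  let parts := (PySem.List.sorted counts.keys (fun x => x) false).foldl
    (fun parts name =>
      -- counts[name]: name is one of counts' keys, so the lookup always hits; getD is exact here
      let n := counts.getD name 0
      parts ++ [if n > 1 then name ++ " x" ++ PySem.Int.toStr n else name]) []
  PySem.Str.join ", " parts

-- ===== PORT B =====
-- the inner while loop over ordered[i..j) : one run of names equal to ordered[i]
def pyRunsB : List String → List String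
  | [] => []
  | x :: rest =>
      let run := rest.takeWhile (fun y => y == x)
      let n : Int := (run.length : Int) + 1
      (if n > 1 then x ++ " x" ++ PySem.Int.toStr n else x) :: pyRunsB (rest.dropWhile (fun y => y == x))
termination_by l => l.length
decreasing_by
  simpa using Nat.lt_succ_of_le (List.length_dropWhile_le (fun y => y == x) rest)

def compress_field_hits_py_alt (field_names : List String) : String :=
  PySem.Str.join ", " (pyRunsB (PySem.List.sorted field_names (fun x => x) false))

-- ===== PRECONDITION & SPEC =====
def Spec_compress_field_hits_py (field_names : List String) (out : String) : Prop := out = compress_field_hits_py_alt field_names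
instance (field_names : List String) (out : String) : Decidable (Spec_compress_field_hits_py field_names out) := by unfold Spec_compress_field_hits_py; infer_instance

-- ===== CLAIM (what is proved, stated in full; the proofs are below) =====
def Claim_equal_compress_field_hits_py : Prop := ∀ (field_names : List String), Dom_compress_field_hits_py field_names → Spec_compress_field_hits_py field_names (compress_field_hits_py field_names)

-- ===== LEMMAS AND PROOFS =====

def mkPart (name : String) (n : Int) : String :=
  if n > 1 then name ++ " x" ++ PySem.Int.toStr n else name

theorem foldl_append_map {α β : Type} (f : α → β) :
    ∀ (l : List α) (init : List β),
      l.foldl (fun acc x => acc ++ [f x]) init = init ++ l.map f := by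
  intro l
  induction l with
  | nil => simp
  | cons x t ih => intro init; simp [List.foldl, ih]

theorem portA_eq_map (xs : List String) :
    compress_field_hits_py xs =
      PySem.Str.join ", "
        ((PySem.List.sorted (PySem.Set.ofList xs) (fun x => x) false).map
          (fun n => mkPart n (xs.count n))) := by
  simp only [compress_field_hits_py, PySem.Dict.foldl_insert_getD_add_one_eq_counter,
    PySem.Dict.keys_counter, foldl_append_map, List.nil_append, mkPart,
    PySem.Dict.getD_counter]

theorem runs_spec_aux (k : Nat) :
    ∀ (l : List String), l.length ≤ k → l.Pairwise (· ≤ ·) →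
    ∃ ds : List String, ds.Nodup ∧ ds.Pairwise (· < ·) ∧ (∀ a, a ∈ ds ↔ a ∈ l) ∧
      pyRunsB l = ds.map (fun n => mkPart n (l.count n)) := by
  induction k with
  | zero =>
    intro l hl _
    have : l = [] := List.eq_nil_of_length_eq_zero (Nat.le_zero.mp hl)
    subst this
    exact ⟨[], by simp, by simp, by simp, by simp [pyRunsB]⟩
  | succ k ih =>
    intro l hl hpw
    match l with
    | [] => exact ⟨[], by simp, by simp, by simp, by simp [pyRunsB]⟩
    | x :: rest =>
      obtain ⟨hx_le, hrest_pw⟩ := List.pairwise_cons.mp hpw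
      set run := rest.takeWhile (fun y => y == x) with hrun
      set tail := rest.dropWhile (fun y => y == x) with htail
      have hsplit : run ++ tail = rest := List.takeWhile_append_dropWhile
      have hrun_eq : ∀ y ∈ run, y = x := by
        intro y hy
        exact eq_of_beq (List.mem_takeWhile_imp (p := fun y => y == x) (l := rest) (hrun ▸ hy))
      have htail_sub : tail.Sublist rest := List.dropWhile_sublist _
      have htail_pw : tail.Pairwise (· ≤ ·) := hrest_pw.sublist htail_sub
      have hlt_tail : ∀ y ∈ tail, x < y := by
        intro y hy
        have hne : tail ≠ [] := List.ne_nil_of_mem hy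
        have hhd : ((fun y => y == x) (tail.head hne)) = false :=
          List.head_dropWhile_not _ hne
        have hhd_ne : tail.head hne ≠ x := by
          intro hcontra
          simp [hcontra] at hhd
        have hhd_mem : tail.head hne ∈ rest := htail_sub.mem (List.head_mem hne)
        have hx_lt_hd : x < tail.head hne := lt_of_le_of_ne (hx_le _ hhd_mem) (Ne.symm hhd_ne)
        rcases List.mem_cons.mp ((List.cons_head_tail hne).symm ▸ hy : y ∈ tail.head hne :: tail.tail) with rfl | hmem
        · exact hx_lt_hd
        · have : tail.head hne ≤ y := by
            have := List.pairwise_cons.mp ((List.cons_head_tail hne).symm ▸ htail_pw :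
              List.Pairwise (· ≤ ·) (tail.head hne :: tail.tail))
            exact this.1 y hmem
          exact lt_of_lt_of_le hx_lt_hd this
      have hx_not_tail : x ∉ tail := fun hx => absurd rfl (ne_of_gt (hlt_tail x hx))
      have hlen : tail.length ≤ k := by
        have h1 := List.length_dropWhile_le (fun y => y == x) rest
        rw [← htail] at h1
        simp only [List.length_cons] at hl
        omega
      obtain ⟨ds', hnd', hlt', hmem', hruns'⟩ := ih tail hlen htail_pw
      refine ⟨x :: ds', ?_, ?_, ?_, ?_⟩
      · refine List.nodup_cons.mpr ⟨?_, hnd'⟩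
        intro hx
        exact hx_not_tail ((hmem' x).mp hx)
      · refine List.pairwise_cons.mpr ⟨?_, hlt'⟩
        intro y hy
        exact hlt_tail y ((hmem' y).mp hy)
      · intro a
        constructor
        · intro ha
          rcases List.mem_cons.mp ha with rfl | ha
          · exact List.mem_cons_self ..
          · exact List.mem_cons_of_mem _ (hsplit ▸ List.mem_append_right run ((hmem' a).mp ha))
        · intro ha
          rcases List.mem_cons.mp ha with ha | ha
          · exact ha ▸ List.mem_cons_self ..
          · rcases List.mem_append.mp (hsplit ▸ ha : a ∈ run ++ tail) with ha | ha
            · exact (hrun_eq a ha) ▸ List.mem_cons_self ..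
            · exact List.mem_cons_of_mem _ ((hmem' a).mpr ha)
      · have hcount_x : (x :: rest).count x = run.length + 1 := by
          have h1 : run.count x = run.length :=
            List.count_eq_length.mpr (fun b hb => (hrun_eq b hb).symm)
          have h2 : tail.count x = 0 := List.count_eq_zero.mpr hx_not_tail
          rw [List.count_cons_self, ← hsplit, List.count_append, h1, h2]
        have hcount_tail : ∀ n ∈ ds', (x :: rest).count n = tail.count n := by
          intro n hn
          have hxn : x ≠ n := ne_of_lt (hlt_tail n ((hmem' n).mp hn))
          have h0 : run.count n = 0 := by
            refine List.count_eq_zero.mpr ?_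
            intro hninrun
            exact hxn ((hrun_eq n hninrun).symm)
          rw [List.count_cons_of_ne hxn, ← hsplit, List.count_append, h0]
          simp
        have hc : ((List.count x (x :: rest) : Int)) = (run.length : Int) + 1 := by
          rw [hcount_x]; push_cast; ring
        have htails : List.map (fun n => mkPart n ((List.count n tail : Int))) ds'
            = List.map (fun n => mkPart n ((List.count n (x :: rest) : Int))) ds' :=
          List.map_congr_left (fun n hn => by rw [hcount_tail n hn])
        show pyRunsB (x :: rest) = _
        rw [pyRunsB]
        simp only [List.map_cons, ← hrun, ← htail]
        rw [hruns', htails, hc]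
        simp [mkPart]

theorem runs_spec (l : List String) (h : l.Pairwise (· ≤ ·)) :
    ∃ ds : List String, ds.Nodup ∧ ds.Pairwise (· < ·) ∧ (∀ a, a ∈ ds ↔ a ∈ l) ∧
      pyRunsB l = ds.map (fun n => mkPart n (l.count n)) :=
  runs_spec_aux l.length l le_rfl h

-- ===== VERDICT (by name: the statement is the Claim_ definition above) =====
theorem compress_field_hits_py_spec : Claim_equal_compress_field_hits_py := by
  intro xs _
  unfold Spec_compress_field_hits_py compress_field_hits_py_alt
  rw [portA_eq_map]
  obtain ⟨ds, hnd, hlt, hmem, hruns⟩ :=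
    runs_spec (PySem.List.sorted xs (fun x => x) false) (by simpa using PySem.List.sorted_pairwise xs (fun x => x))
  rw [hruns]
  have hperm : ds.Perm (PySem.Set.ofList xs) := by
    rw [List.perm_ext_iff_of_nodup hnd (PySem.Set.nodup_ofList xs)]
    intro a
    rw [hmem, PySem.List.mem_sorted, PySem.Set.mem_ofList]
  have hsorted : PySem.List.sorted (PySem.Set.ofList xs) (fun x => x) false = ds :=
    PySem.List.sorted_eq_of_perm_of_pairwise_lt _ _ _ hperm hlt
  rw [hsorted]
  congr 1
  apply List.map_congr_left
  intro n _
  have : (PySem.List.sorted xs (fun x => x) false).count n = xs.count n :=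
    (PySem.List.sorted_perm xs (fun x => x) false).count_eq n
  rw [this]
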